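-- pv_equiv track=rewrite | github.com/5l1v3r1/lazypkg | lazypkg.py | generate_movements
-- ===== SOURCE A (Python) =====
-- def escape(string, wrap = '"'):
--     string = str(string).replace('\\', '\\\\').replace('"', '\\"')
--
--     if wrap == "'":
--         string = string.replace(wrap, '\'"\'"\'')
--
--     return string
--
-- def indent_lines(text, size = 4):
--     output = ''
--
--     for line in text.strip().split('\n'):
--         output += ' ' * size + line.strip() + '\n'
--
--     return output
--
-- def generate_movements(mode, config, indent = 0):
--     source = ''
--
--     if mode != 'pkgbuild':
--         source += 'cd "${srcdir}/${pkgname}-${pkgver}"\n\n'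
--
--     for movement_def in config.get('movements', []):
--         for movement in movement_def:
--             if not movement in ['chmod', 'chown']:
--                 source += 'mkdir -p "%s"\n' % (('$pkgdir/' if mode == 'pkgbuild' else '') + escape(movement_def[movement]))
--
--     if not source == '':
--         source = '# ensure target directories exist\n' + source + '\n# copy files over and change perms\n'
--
--     for movement_def in config.get('movements', []):
--         src, target = [None] * 2
--         chmod, chown = [None] * 2
--
--         for movement in movement_def:
--             if movement == 'chmod':
--                 chmod = movement_def[movement]
--             elif movement == 'chown':
--                 chown = movement_def[movement]
--             else:
--                 src = movement
--                 target = movement_def[movement]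
--
--         if not target is None:
--             # we have to chmod/chown beforehand because we don't know the path of the dest file
--             if mode != 'pkgbuild':
--                 if not chmod is None:
--                     source += 'chmod -R %d "%s"\n' % (int(chmod), escape(src))
--                 if not chown is None:
--                     source += 'chown -R "%s" "%s"\n' % (escape(chown), escape(src))
--
--                 source += 'rsync -pr "%s" "%s"\n' % (escape(src), escape(target))
--             else:
--                 if src == '.':
--                     src = '.'
--
--                 append = ''
--                 if not chmod is None:
--                     append += '--mode=%d ' % int(chmod)
--                 if not chown is None:
--                     owner, group = chown.split(':')
--                     append += '--owner="%s" --group="%s"' % (escape(owner), escape(group))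
--
--                 source += 'rinstall "${srcdir}/${pkgname}-${pkgver}/%s" "${pkgdir}/%s" %s\n' % (escape(src), escape(target), append)
--
--     return indent_lines(source, indent)
-- ===== SOURCE B (Python) =====
-- def escape(string, wrap = '"'):
--     string = str(string).replace('\\', '\\\\').replace('"', '\\"')
--
--     if wrap == "'":
--         string = string.replace(wrap, '\'"\'"\'')
--
--     return string
--
-- def indent_lines(text, size = 4):
--     return ''.join(' ' * size + line.strip() + '\n'
--                    for line in text.strip().split('\n'))
--
-- def generate_movements(mode, config, indent = 0):
--     pkgbuild = (mode == 'pkgbuild')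
--     dirs = []
--     copies = []
--
--     for movement_def in config.get('movements', []):
--         src = target = chmod = chown = None
--         for key, value in movement_def.items():
--             if key == 'chmod':
--                 chmod = value
--             elif key == 'chown':
--                 chown = value
--             else:
--                 dirs.append('mkdir -p "%s"' % (('$pkgdir/' if pkgbuild else '') + escape(value)))
--                 src, target = key, value
--         if target is None:
--             continue
--         if pkgbuild:
--             append = ''
--             if chmod is not None:
--                 append += '--mode=%d ' % int(chmod)
--             if chown is not None:
--                 owner, group = chown.split(':')
--                 append += '--owner="%s" --group="%s"' % (escape(owner), escape(group))
--             copies.append('rinstall "${srcdir}/${pkgname}-${pkgver}/%s" "${pkgdir}/%s" %s'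
--                           % (escape(src), escape(target), append))
--         else:
--             if chmod is not None:
--                 copies.append('chmod -R %d "%s"' % (int(chmod), escape(src)))
--             if chown is not None:
--                 copies.append('chown -R "%s" "%s"' % (escape(chown), escape(src)))
--             copies.append('rsync -pr "%s" "%s"' % (escape(src), escape(target)))
--
--     body = '' if pkgbuild else 'cd "${srcdir}/${pkgname}-${pkgver}"\n\n'
--     body += ''.join(line + '\n' for line in dirs)
--     if body:
--         body = '# ensure target directories exist\n' + body + '\n# copy files over and change perms\n'
--     body += ''.join(line + '\n' for line in copies)
--
--     return indent_lines(body, indent)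
-- ===== Notes on version B (the rewrite author's own statement) =====
-- stated objective: alternative
-- what changed: A makes two sequential passes over the movements (one emitting all mkdir lines into the growing script string, then a second recomputing src/target/chmod/chown per movement to emit the copy lines); B makes a single pass that fills a dirs buffer and a copies buffer per movement and assembles the script once at the end from the two buffers.
import Mathlib
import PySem

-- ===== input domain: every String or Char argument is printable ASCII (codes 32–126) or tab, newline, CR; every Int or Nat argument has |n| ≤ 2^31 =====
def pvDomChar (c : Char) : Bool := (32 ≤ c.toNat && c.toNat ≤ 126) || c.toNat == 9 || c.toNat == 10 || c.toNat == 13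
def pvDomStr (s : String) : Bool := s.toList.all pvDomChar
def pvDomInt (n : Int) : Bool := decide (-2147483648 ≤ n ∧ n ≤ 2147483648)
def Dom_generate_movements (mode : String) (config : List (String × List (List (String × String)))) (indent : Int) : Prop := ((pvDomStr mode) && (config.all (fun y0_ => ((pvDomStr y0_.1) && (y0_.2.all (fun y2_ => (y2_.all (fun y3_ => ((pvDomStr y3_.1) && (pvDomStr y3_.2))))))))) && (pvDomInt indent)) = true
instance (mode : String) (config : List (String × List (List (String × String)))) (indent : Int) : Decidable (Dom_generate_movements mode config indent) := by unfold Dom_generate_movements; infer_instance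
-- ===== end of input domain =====

-- B fuses A's two sequential passes over the movements into one pass that fills a dirs buffer and a
-- copies buffer per movement, then assembles the script once; objective: alternative/simpler decomposition.

-- ===== PORT A =====
-- shared module helper escape(string, wrap='"') (both Source A and Source B carry it verbatim)
def pvEscape (string : String) (wrap : String) : String :=
  let s := PySem.Str.replace (PySem.Str.replace string "\\" "\\\\") "\"" "\\\""
  if wrap == "'" then PySem.Str.replace s wrap "'\"'\"'" else s

-- ' ' * size (Python: empty for size ≤ 0; Int.toNat clamps exactly so)
def pvSpaces (size : Int) : String := String.ofList (List.replicate size.toNat ' ')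

-- indent_lines of Source A: a loop accumulating output
def indentLines (text : String) (size : Int) : String :=
  ((PySem.Str.split? (PySem.Str.strip text) "\n").getD []).foldl
    (fun output line => output ++ (pvSpaces size ++ PySem.Str.strip line ++ "\n")) ""

def generate_movements (mode : String) (config : List (String × List (List (String × String)))) (indent : Int) : String :=
  let source : String :=
    if ¬ (mode == "pkgbuild") then "cd \"${srcdir}/${pkgname}-${pkgver}\"\n\n" else ""
  let movements := (PySem.Dict.ofList config).getD "movements" []
  -- first pass: mkdir lines
  let source := movements.foldl (fun source movement_def =>
    let d := PySem.Dict.ofList movement_def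
    d.keys.foldl (fun source movement =>
      if ¬ (movement == "chmod" || movement == "chown") then
        source ++ ("mkdir -p \"" ++
          ((if mode == "pkgbuild" then "$pkgdir/" else "") ++ pvEscape (d.getD movement "") "\"") ++ "\"\n")
      else source) source) source
  let source :=
    if ¬ (source == "") then
      "# ensure target directories exist\n" ++ source ++ "\n# copy files over and change perms\n"
    else source
  -- second pass: copy lines
  let source := movements.foldl (fun source movement_def =>
    let d := PySem.Dict.ofList movement_def
    let st := d.keys.foldl
      (fun (st : Option String × Option String × Option String × Option String) movement =>
        if movement == "chmod" then (st.1, st.2.1, some (d.getD movement ""), st.2.2.2)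
        else if movement == "chown" then (st.1, st.2.1, st.2.2.1, some (d.getD movement ""))
        else (some movement, some (d.getD movement ""), st.2.2.1, st.2.2.2))
      (none, none, none, none)
    let (src, target, chmod, chown) := st
    match target with
    | none => source
    | some target =>
      if ¬ (mode == "pkgbuild") then
        let source := match chmod with
          | some c => source ++ ("chmod -R " ++ PySem.Int.toStr ((PySem.Int.ofStr? c).getD 0) ++
              " \"" ++ pvEscape (src.getD "") "\"" ++ "\"\n")   -- Pre_ guarantees int(chmod) parses
          | none => source
        let source := match chown with
          | some c => source ++ ("chown -R \"" ++ pvEscape c "\"" ++ "\" \"" ++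
              pvEscape (src.getD "") "\"" ++ "\"\n")
          | none => source
        source ++ ("rsync -pr \"" ++ pvEscape (src.getD "") "\"" ++ "\" \"" ++ pvEscape target "\"" ++ "\"\n")
      else
        let src := if src == some "." then some "." else src   -- the no-op `if src == '.'` of Source A, kept
        let append := match chmod with
          | some c => "--mode=" ++ PySem.Int.toStr ((PySem.Int.ofStr? c).getD 0) ++ " "
          | none => ""
        let append := append ++ (match chown with
          | some c =>
            -- Pre_ guarantees chown.split(':') has exactly two parts (tuple unpacking)
            let parts := (PySem.Str.split? c ":").getD []
            "--owner=\"" ++ pvEscape (parts.getD 0 "") "\"" ++ "\" --group=\"" ++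
              pvEscape (parts.getD 1 "") "\"" ++ "\""
          | none => "")
        source ++ ("rinstall \"${srcdir}/${pkgname}-${pkgver}/" ++ pvEscape (src.getD "") "\"" ++
          "\" \"${pkgdir}/" ++ pvEscape target "\"" ++ "\" " ++ append ++ "\n")) source
  indentLines source indent

-- ===== PORT B =====
-- indent_lines of Source B: ''.join of a generator expression
def indentLinesAlt (text : String) (size : Int) : String :=
  PySem.Str.join "" (((PySem.Str.split? (PySem.Str.strip text) "\n").getD []).map
    (fun line => pvSpaces size ++ PySem.Str.strip line ++ "\n"))

def generate_movements_alt (mode : String) (config : List (String × List (List (String × String)))) (indent : Int) : String :=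
  let pkgbuild := mode == "pkgbuild"
  let acc := ((PySem.Dict.ofList config).getD "movements" []).foldl
    (fun (acc : List String × List String) movement_def =>
      let d := PySem.Dict.ofList movement_def
      -- one pass over the items: collect mkdir lines, track last src/target and chmod/chown
      let st := d.items.foldl
        (fun (st : List String × Option String × Option String × Option String × Option String) kv =>
          let (dirs, src, target, chmod, chown) := st
          if kv.1 == "chmod" then (dirs, src, target, some kv.2, chown)
          else if kv.1 == "chown" then (dirs, src, target, chmod, some kv.2)
          else (dirs ++ ["mkdir -p \"" ++ ((if pkgbuild then "$pkgdir/" else "") ++ pvEscape kv.2 "\"") ++ "\""],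
                some kv.1, some kv.2, chmod, chown))
        (acc.1, none, none, none, none)
      let (dirs, src, target, chmod, chown) := st
      match target with
      | none => (dirs, acc.2)
      | some target =>
        if pkgbuild then
          let append := match chmod with
            | some c => "--mode=" ++ PySem.Int.toStr ((PySem.Int.ofStr? c).getD 0) ++ " "
            | none => ""
          let append := append ++ (match chown with
            | some c =>
              let parts := (PySem.Str.split? c ":").getD []
              "--owner=\"" ++ pvEscape (parts.getD 0 "") "\"" ++ "\" --group=\"" ++
                pvEscape (parts.getD 1 "") "\"" ++ "\""
            | none => "")
          (dirs, acc.2 ++ ["rinstall \"${srcdir}/${pkgname}-${pkgver}/" ++ pvEscape (src.getD "") "\"" ++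
            "\" \"${pkgdir}/" ++ pvEscape target "\"" ++ "\" " ++ append])
        else
          let cs := match chmod with
            | some c => ["chmod -R " ++ PySem.Int.toStr ((PySem.Int.ofStr? c).getD 0) ++
                " \"" ++ pvEscape (src.getD "") "\"" ++ "\""]
            | none => []
          let cs := cs ++ (match chown with
            | some c => ["chown -R \"" ++ pvEscape c "\"" ++ "\" \"" ++ pvEscape (src.getD "") "\"" ++ "\""]
            | none => [])
          (dirs, acc.2 ++ cs ++
            ["rsync -pr \"" ++ pvEscape (src.getD "") "\"" ++ "\" \"" ++ pvEscape target "\"" ++ "\""]))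
    ([], [])
  let body := (if pkgbuild then "" else "cd \"${srcdir}/${pkgname}-${pkgver}\"\n\n") ++
    PySem.Str.join "" (acc.1.map (· ++ "\n"))
  let body :=
    if ¬ (body == "") then
      "# ensure target directories exist\n" ++ body ++ "\n# copy files over and change perms\n"
    else body
  let body := body ++ PySem.Str.join "" (acc.2.map (· ++ "\n"))
  indentLinesAlt body indent

-- ===== PRECONDITION & SPEC =====
-- Pre_ excludes exactly the inputs on which Source A raises: a movement with a target whose 'chmod'
-- value is not int()-parsable (ValueError), or — in pkgbuild mode — whose 'chown' value does not
-- split on ':' into exactly two parts (tuple-unpacking ValueError).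
def Pre_generate_movements (mode : String) (config : List (String × List (List (String × String)))) (indent : Int) : Prop :=
  ∀ m ∈ (PySem.Dict.ofList config).getD "movements" [],
    let d := PySem.Dict.ofList m
    (d.keys.any (fun k => ¬ (k == "chmod" || k == "chown"))) = true →
      ((d.contains "chmod" = true → (PySem.Int.ofStr? (d.getD "chmod" "")).isSome = true) ∧
       (mode = "pkgbuild" → d.contains "chown" = true →
         ((PySem.Str.split? (d.getD "chown" "") ":").getD []).length = 2))
instance (mode : String) (config : List (String × List (List (String × String)))) (indent : Int) : Decidable (Pre_generate_movements mode config indent) := by unfold Pre_generate_movements; infer_instance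

def pvWitness_generate_movements : String × (List (String × List (List (String × String)))) × Int :=
  ("pkgbuild", [("movements", [[("etc/app", "usr/share/app"), ("chmod", "755"), ("chown", "root:root")]])], 2)

def Spec_generate_movements (mode : String) (config : List (String × List (List (String × String)))) (indent : Int) (out : String) : Prop := out = generate_movements_alt mode config indent
instance (mode : String) (config : List (String × List (List (String × String)))) (indent : Int) (out : String) : Decidable (Spec_generate_movements mode config indent out) := by unfold Spec_generate_movements; infer_instance

-- ===== CLAIM (what is proved, stated in full; the proofs are below) =====
def Claim_equal_generate_movements : Prop := ∀ (mode : String) (config : List (String × List (List (String × String)))) (indent : Int), Dom_generate_movements mode config indent → Pre_generate_movements mode config indent → Spec_generate_movements mode config indent (generate_movements mode config indent)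

-- ===== LEMMAS AND PROOFS =====

-- join with empty separator behaves like concatenation
theorem join_nil_nil : PySem.Str.join "" [] = "" := rfl

theorem join_nil_cons (x : String) (xs : List String) :
    PySem.Str.join "" (x :: xs) = x ++ PySem.Str.join "" xs := by
  apply String.toList_inj.mp
  cases xs with
  | nil => simp [PySem.Str.toList_join, PySem.Chars.join_singleton, PySem.Chars.join_nil]
  | cons y ys => simp [PySem.Str.toList_join, PySem.Chars.join_cons_cons]

theorem join_nil_append (xs ys : List String) :
    PySem.Str.join "" (xs ++ ys) = PySem.Str.join "" xs ++ PySem.Str.join "" ys := by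
  induction xs with
  | nil => simp [join_nil_nil]
  | cons x xs ih => simp [join_nil_cons, ih, String.append_assoc]

-- a string-accumulating foldl is the join of the per-element strings
theorem foldl_append_join {α : Type} (g : α → String) (l : List α) (s : String) :
    l.foldl (fun o x => o ++ g x) s = s ++ PySem.Str.join "" (l.map g) := by
  induction l generalizing s with
  | nil => simp [join_nil_nil]
  | cons x xs ih => simp [List.foldl_cons, ih, join_nil_cons, String.append_assoc]

theorem join_map_flatMap {α β : Type} (f : α → List β) (g : β → String) (ms : List α) :
    PySem.Str.join "" ((ms.flatMap f).map g)
    = PySem.Str.join "" (ms.map (fun m => PySem.Str.join "" ((f m).map g))) := by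
  induction ms with
  | nil => simp [join_nil_nil]
  | cons m t ih => simp [List.flatMap_cons, List.map_append, join_nil_append, ih, join_nil_cons]

theorem foldl_pair_append {α β γ : Type} (f : α → List β) (g : α → List γ)
    (ms : List α) (xs : List β) (ys : List γ) :
    ms.foldl (fun acc m => (acc.1 ++ f m, acc.2 ++ g m)) (xs, ys)
    = (xs ++ ms.flatMap f, ys ++ ms.flatMap g) := by
  induction ms generalizing xs ys with
  | nil => simp
  | cons m t ih => simp [List.foldl_cons, ih, List.flatMap_cons, List.append_assoc]

theorem quote_nl : ("\"" : String) ++ "\n" = "\"\n" := by decide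

theorem indentLines_eq (text : String) (size : Int) :
    indentLines text size = indentLinesAlt text size := by
  unfold indentLines indentLinesAlt
  rw [foldl_append_join (fun line => pvSpaces size ++ PySem.Str.strip line ++ "\n")]
  simp

-- the per-movement building blocks both versions produce
def pvMk (mode : String) (v : String) : String :=
  "mkdir -p \"" ++ ((if mode == "pkgbuild" then "$pkgdir/" else "") ++ pvEscape v "\"") ++ "\""

def pvDirs (mode : String) (l : List (String × String)) : List String :=
  (l.filter (fun kv => ¬ (kv.1 == "chmod" || kv.1 == "chown"))).map (fun kv => pvMk mode kv.2)

def pvStep (st : Option String × Option String × Option String × Option String)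
    (kv : String × String) : Option String × Option String × Option String × Option String :=
  if kv.1 == "chmod" then (st.1, st.2.1, some kv.2, st.2.2.2)
  else if kv.1 == "chown" then (st.1, st.2.1, st.2.2.1, some kv.2)
  else (some kv.1, some kv.2, st.2.2.1, st.2.2.2)

def pvSt (l : List (String × String)) : Option String × Option String × Option String × Option String :=
  l.foldl pvStep (none, none, none, none)

def pvAppend (chmod chown : Option String) : String :=
  (match chmod with
   | some c => "--mode=" ++ PySem.Int.toStr ((PySem.Int.ofStr? c).getD 0) ++ " "
   | none => "") ++
  (match chown with
   | some c =>
     let parts := (PySem.Str.split? c ":").getD []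
     "--owner=\"" ++ pvEscape (parts.getD 0 "") "\"" ++ "\" --group=\"" ++
       pvEscape (parts.getD 1 "") "\"" ++ "\""
   | none => "")

def pvCopy (mode : String)
    (st : Option String × Option String × Option String × Option String) : List String :=
  match st with
  | (src, target, chmod, chown) =>
    match target with
    | none => []
    | some target =>
      if mode == "pkgbuild" then
        ["rinstall \"${srcdir}/${pkgname}-${pkgver}/" ++ pvEscape (src.getD "") "\"" ++
          "\" \"${pkgdir}/" ++ pvEscape target "\"" ++ "\" " ++ pvAppend chmod chown]
      else
        (match chmod with
         | some c => ["chmod -R " ++ PySem.Int.toStr ((PySem.Int.ofStr? c).getD 0) ++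
             " \"" ++ pvEscape (src.getD "") "\"" ++ "\""]
         | none => []) ++
        (match chown with
         | some c => ["chown -R \"" ++ pvEscape c "\"" ++ "\" \"" ++ pvEscape (src.getD "") "\"" ++ "\""]
         | none => []) ++
        ["rsync -pr \"" ++ pvEscape (src.getD "") "\"" ++ "\" \"" ++ pvEscape target "\"" ++ "\""]

def pvDirsAll (mode : String) (ms : List (List (String × String))) : List String :=
  ms.flatMap (fun m => pvDirs mode (PySem.Dict.ofList m).items)

def pvCopyAll (mode : String) (ms : List (List (String × String))) : List String :=
  ms.flatMap (fun m => pvCopy mode (pvSt (PySem.Dict.ofList m).items))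

theorem dot_noop (src : Option String) : (if src = some "." then some "." else src) = src := by
  split_ifs with h
  · exact h.symm
  · rfl

-- A's first inner loop over a raw item list
theorem foldl_mkdir (mode : String) (l : List (String × String)) (s : String) :
    l.foldl (fun source kv =>
      if ¬ (kv.1 == "chmod" || kv.1 == "chown") then
        source ++ ("mkdir -p \"" ++
          ((if mode == "pkgbuild" then "$pkgdir/" else "") ++ pvEscape kv.2 "\"") ++ "\"\n")
      else source) s
    = s ++ PySem.Str.join "" ((pvDirs mode l).map (· ++ "\n")) := by
  induction l generalizing s with
  | nil => simp [pvDirs, join_nil_nil]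
  | cons kv t ih =>
    obtain ⟨k, v⟩ := kv
    rw [List.foldl_cons]
    by_cases h : k = "chmod" ∨ k = "chown"
    · have hb : (k == "chmod" || k == "chown") = true := by
        rcases h with h | h <;> simp [h]
      rw [if_neg (not_not_intro hb), ih]
      rcases h with h | h <;> subst h <;> simp [pvDirs]
    · have h1 : ¬ k = "chmod" := fun e => h (Or.inl e)
      have h2 : ¬ k = "chown" := fun e => h (Or.inr e)
      have hb : ¬ ((k == "chmod" || k == "chown") = true) := by simp [h1, h2]
      rw [if_pos hb, ih]
      simp [pvDirs, pvMk, h1, h2, join_nil_cons, String.append_assoc, quote_nl]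

-- rewrite a fold over d.keys that looks values up with getD into a fold over d.items
theorem keys_foldl_to_items {β : Type} (m : List (String × String))
    (f : β → String → String → β) (s : β) :
    (PySem.Dict.ofList m).keys.foldl
        (fun acc movement => f acc movement ((PySem.Dict.ofList m).getD movement "")) s
    = (PySem.Dict.ofList m).items.foldl (fun acc kv => f acc kv.1 kv.2) s := by
  have hnd : (PySem.Dict.ofList m).keys.Nodup := PySem.Dict.nodup_keys_ofList m
  conv_rhs => rw [PySem.Dict.items_eq_map_keys (PySem.Dict.ofList m) hnd "", List.foldl_map]

theorem A1_inner (mode : String) (m : List (String × String)) (s : String) :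
    (PySem.Dict.ofList m).keys.foldl (fun source movement =>
      if ¬ (movement == "chmod" || movement == "chown") then
        source ++ ("mkdir -p \"" ++
          ((if mode == "pkgbuild" then "$pkgdir/" else "") ++
            pvEscape ((PySem.Dict.ofList m).getD movement "") "\"") ++ "\"\n")
      else source) s
    = s ++ PySem.Str.join "" ((pvDirs mode (PySem.Dict.ofList m).items).map (· ++ "\n")) := by
  rw [keys_foldl_to_items m (fun acc k v =>
    if ¬ (k == "chmod" || k == "chown") then
      acc ++ ("mkdir -p \"" ++
        ((if mode == "pkgbuild" then "$pkgdir/" else "") ++ pvEscape v "\"") ++ "\"\n")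
    else acc) s]
  exact foldl_mkdir mode _ s

theorem A2_inner (m : List (String × String)) :
    (PySem.Dict.ofList m).keys.foldl
      (fun (st : Option String × Option String × Option String × Option String) movement =>
        if movement == "chmod" then (st.1, st.2.1, some ((PySem.Dict.ofList m).getD movement ""), st.2.2.2)
        else if movement == "chown" then (st.1, st.2.1, st.2.2.1, some ((PySem.Dict.ofList m).getD movement ""))
        else (some movement, some ((PySem.Dict.ofList m).getD movement ""), st.2.2.1, st.2.2.2))
      (none, none, none, none)
    = pvSt (PySem.Dict.ofList m).items := by
  rw [keys_foldl_to_items m (fun st k v =>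
    if k == "chmod" then (st.1, st.2.1, some v, st.2.2.2)
    else if k == "chown" then (st.1, st.2.1, st.2.2.1, some v)
    else (some k, some v, st.2.2.1, st.2.2.2)) (none, none, none, none)]
  rfl

-- the second outer loop of A appends exactly the joined copy lines of the movement
theorem A2_block (mode : String)
    (st : Option String × Option String × Option String × Option String) (s : String) :
    (let (src, target, chmod, chown) := st
     match target with
     | none => s
     | some target =>
       if ¬ (mode == "pkgbuild") then
         let s := match chmod with
           | some c => s ++ ("chmod -R " ++ PySem.Int.toStr ((PySem.Int.ofStr? c).getD 0) ++
               " \"" ++ pvEscape (src.getD "") "\"" ++ "\"\n")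
           | none => s
         let s := match chown with
           | some c => s ++ ("chown -R \"" ++ pvEscape c "\"" ++ "\" \"" ++
               pvEscape (src.getD "") "\"" ++ "\"\n")
           | none => s
         s ++ ("rsync -pr \"" ++ pvEscape (src.getD "") "\"" ++ "\" \"" ++ pvEscape target "\"" ++ "\"\n")
       else
         let src := if src == some "." then some "." else src
         let append := match chmod with
           | some c => "--mode=" ++ PySem.Int.toStr ((PySem.Int.ofStr? c).getD 0) ++ " "
           | none => ""
         let append := append ++ (match chown with
           | some c =>
             let parts := (PySem.Str.split? c ":").getD []
             "--owner=\"" ++ pvEscape (parts.getD 0 "") "\"" ++ "\" --group=\"" ++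
               pvEscape (parts.getD 1 "") "\"" ++ "\""
           | none => "")
         s ++ ("rinstall \"${srcdir}/${pkgname}-${pkgver}/" ++ pvEscape (src.getD "") "\"" ++
           "\" \"${pkgdir}/" ++ pvEscape target "\"" ++ "\" " ++ append ++ "\n"))
    = s ++ PySem.Str.join "" ((pvCopy mode st).map (· ++ "\n")) := by
  obtain ⟨src, target, chmod, chown⟩ := st
  cases target with
  | none => simp [pvCopy, join_nil_nil]
  | some target =>
    by_cases hm : (mode == "pkgbuild") = true
    · simp only [hm]
      rcases chmod with _ | c <;> rcases chown with _ | c' <;>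
        simp [pvCopy, pvAppend, hm, dot_noop, join_nil_cons, join_nil_nil,
          String.append_assoc, String.append_empty, quote_nl]
    · simp only [hm]
      rcases chmod with _ | c <;> rcases chown with _ | c' <;>
        simp [pvCopy, pvAppend, hm, join_nil_cons, join_nil_nil,
          String.append_assoc, String.append_empty, quote_nl]

-- B's fused inner loop over the items of one movement
theorem B_inner (mode : String) (l : List (String × String)) (dirs : List String)
    (s1 s2 s3 s4 : Option String) :
    l.foldl (fun (acc : List String × Option String × Option String × Option String × Option String) kv =>
        let (dirs, src, target, chmod, chown) := acc
        if kv.1 == "chmod" then (dirs, src, target, some kv.2, chown)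
        else if kv.1 == "chown" then (dirs, src, target, chmod, some kv.2)
        else (dirs ++ ["mkdir -p \"" ++
            ((if mode == "pkgbuild" then "$pkgdir/" else "") ++ pvEscape kv.2 "\"") ++ "\""],
          some kv.1, some kv.2, chmod, chown))
      (dirs, s1, s2, s3, s4)
    = (dirs ++ pvDirs mode l, l.foldl pvStep (s1, s2, s3, s4)) := by
  induction l generalizing dirs s1 s2 s3 s4 with
  | nil => simp [pvDirs]
  | cons kv t ih =>
    obtain ⟨k, v⟩ := kv
    rw [List.foldl_cons, List.foldl_cons]
    by_cases h1 : k = "chmod"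
    · subst h1
      rw [show pvStep (s1, s2, s3, s4) ("chmod", v) = (s1, s2, some v, s4) from rfl]
      simpa using ih dirs s1 s2 (some v) s4
    · by_cases h2 : k = "chown"
      · subst h2
        rw [show pvStep (s1, s2, s3, s4) ("chown", v) = (s1, s2, s3, some v) from rfl]
        simpa [h1] using ih dirs s1 s2 s3 (some v)
      · have e : pvStep (s1, s2, s3, s4) (k, v) = (some k, some v, s3, s4) := by
          simp [pvStep, h1, h2]
        rw [e]
        have := ih (dirs ++ ["mkdir -p \"" ++
            ((if mode == "pkgbuild" then "$pkgdir/" else "") ++ pvEscape v "\"") ++ "\""])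
            (some k) (some v) s3 s4
        simp [beq_iff_eq, h1, h2, pvDirs, pvMk, List.append_assoc] at this ⊢
        exact this

-- B's per-movement copies step
theorem B_block (mode : String)
    (st5 : List String × Option String × Option String × Option String × Option String)
    (copies : List String) :
    (let (dirs, src, target, chmod, chown) := st5
     match target with
     | none => (dirs, copies)
     | some target =>
       if mode == "pkgbuild" then
         let append := match chmod with
           | some c => "--mode=" ++ PySem.Int.toStr ((PySem.Int.ofStr? c).getD 0) ++ " "
           | none => ""
         let append := append ++ (match chown with
           | some c =>
             let parts := (PySem.Str.split? c ":").getD []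
             "--owner=\"" ++ pvEscape (parts.getD 0 "") "\"" ++ "\" --group=\"" ++
               pvEscape (parts.getD 1 "") "\"" ++ "\""
           | none => "")
         (dirs, copies ++ ["rinstall \"${srcdir}/${pkgname}-${pkgver}/" ++ pvEscape (src.getD "") "\"" ++
           "\" \"${pkgdir}/" ++ pvEscape target "\"" ++ "\" " ++ append])
       else
         let cs := match chmod with
           | some c => ["chmod -R " ++ PySem.Int.toStr ((PySem.Int.ofStr? c).getD 0) ++
               " \"" ++ pvEscape (src.getD "") "\"" ++ "\""]
           | none => []
         let cs := cs ++ (match chown with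
           | some c => ["chown -R \"" ++ pvEscape c "\"" ++ "\" \"" ++ pvEscape (src.getD "") "\"" ++ "\""]
           | none => [])
         (dirs, copies ++ cs ++
           ["rsync -pr \"" ++ pvEscape (src.getD "") "\"" ++ "\" \"" ++ pvEscape target "\"" ++ "\""]))
    = (st5.1, copies ++ pvCopy mode (st5.2.1, st5.2.2.1, st5.2.2.2.1, st5.2.2.2.2)) := by
  obtain ⟨dirs, src, target, chmod, chown⟩ := st5
  cases target with
  | none => simp [pvCopy]
  | some target =>
    by_cases hm : (mode == "pkgbuild") = true
    · rcases chmod with _ | c <;> rcases chown with _ | c' <;>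
        simp [pvCopy, pvAppend, hm]
    · rcases chmod with _ | c <;> rcases chown with _ | c' <;>
        simp [pvCopy, hm, List.append_assoc]

-- the outer loops
theorem A1_outer (mode : String) (ms : List (List (String × String))) (s : String) :
    ms.foldl (fun source movement_def =>
      (PySem.Dict.ofList movement_def).keys.foldl (fun source movement =>
        if ¬ (movement == "chmod" || movement == "chown") then
          source ++ ("mkdir -p \"" ++
            ((if mode == "pkgbuild" then "$pkgdir/" else "") ++
              pvEscape ((PySem.Dict.ofList movement_def).getD movement "") "\"") ++ "\"\n")
        else source) source) s
    = s ++ PySem.Str.join "" ((pvDirsAll mode ms).map (· ++ "\n")) := by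
  induction ms generalizing s with
  | nil => simp [pvDirsAll, join_nil_nil]
  | cons m t ih =>
    rw [List.foldl_cons, A1_inner, ih]
    simp [pvDirsAll, List.flatMap_cons, join_nil_append, String.append_assoc]

theorem A2_body (mode : String) (m : List (String × String)) (s : String) :
    (let st := (PySem.Dict.ofList m).keys.foldl
        (fun (st : Option String × Option String × Option String × Option String) movement =>
          if movement == "chmod" then (st.1, st.2.1, some ((PySem.Dict.ofList m).getD movement ""), st.2.2.2)
          else if movement == "chown" then (st.1, st.2.1, st.2.2.1, some ((PySem.Dict.ofList m).getD movement ""))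
          else (some movement, some ((PySem.Dict.ofList m).getD movement ""), st.2.2.1, st.2.2.2))
        (none, none, none, none)
     let (src, target, chmod, chown) := st
     match target with
     | none => s
     | some target =>
       if ¬ (mode == "pkgbuild") then
         let s := match chmod with
           | some c => s ++ ("chmod -R " ++ PySem.Int.toStr ((PySem.Int.ofStr? c).getD 0) ++
               " \"" ++ pvEscape (src.getD "") "\"" ++ "\"\n")
           | none => s
         let s := match chown with
           | some c => s ++ ("chown -R \"" ++ pvEscape c "\"" ++ "\" \"" ++
               pvEscape (src.getD "") "\"" ++ "\"\n")
           | none => s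
         s ++ ("rsync -pr \"" ++ pvEscape (src.getD "") "\"" ++ "\" \"" ++ pvEscape target "\"" ++ "\"\n")
       else
         let src := if src == some "." then some "." else src
         let append := match chmod with
           | some c => "--mode=" ++ PySem.Int.toStr ((PySem.Int.ofStr? c).getD 0) ++ " "
           | none => ""
         let append := append ++ (match chown with
           | some c =>
             let parts := (PySem.Str.split? c ":").getD []
             "--owner=\"" ++ pvEscape (parts.getD 0 "") "\"" ++ "\" --group=\"" ++
               pvEscape (parts.getD 1 "") "\"" ++ "\""
           | none => "")
         s ++ ("rinstall \"${srcdir}/${pkgname}-${pkgver}/" ++ pvEscape (src.getD "") "\"" ++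
           "\" \"${pkgdir}/" ++ pvEscape target "\"" ++ "\" " ++ append ++ "\n"))
    = s ++ PySem.Str.join "" ((pvCopy mode (pvSt (PySem.Dict.ofList m).items)).map (· ++ "\n")) := by
  rw [A2_inner]
  exact A2_block mode (pvSt (PySem.Dict.ofList m).items) s

theorem A2_outer (mode : String) (ms : List (List (String × String))) (s : String) :
    ms.foldl (fun source movement_def =>
      let st := (PySem.Dict.ofList movement_def).keys.foldl
        (fun (st : Option String × Option String × Option String × Option String) movement =>
          if movement == "chmod" then (st.1, st.2.1, some ((PySem.Dict.ofList movement_def).getD movement ""), st.2.2.2)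
          else if movement == "chown" then (st.1, st.2.1, st.2.2.1, some ((PySem.Dict.ofList movement_def).getD movement ""))
          else (some movement, some ((PySem.Dict.ofList movement_def).getD movement ""), st.2.2.1, st.2.2.2))
        (none, none, none, none)
      let (src, target, chmod, chown) := st
      match target with
      | none => source
      | some target =>
        if ¬ (mode == "pkgbuild") then
          let source := match chmod with
            | some c => source ++ ("chmod -R " ++ PySem.Int.toStr ((PySem.Int.ofStr? c).getD 0) ++
                " \"" ++ pvEscape (src.getD "") "\"" ++ "\"\n")
            | none => source
          let source := match chown with
            | some c => source ++ ("chown -R \"" ++ pvEscape c "\"" ++ "\" \"" ++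
                pvEscape (src.getD "") "\"" ++ "\"\n")
            | none => source
          source ++ ("rsync -pr \"" ++ pvEscape (src.getD "") "\"" ++ "\" \"" ++ pvEscape target "\"" ++ "\"\n")
        else
          let src := if src == some "." then some "." else src
          let append := match chmod with
            | some c => "--mode=" ++ PySem.Int.toStr ((PySem.Int.ofStr? c).getD 0) ++ " "
            | none => ""
          let append := append ++ (match chown with
            | some c =>
              let parts := (PySem.Str.split? c ":").getD []
              "--owner=\"" ++ pvEscape (parts.getD 0 "") "\"" ++ "\" --group=\"" ++
                pvEscape (parts.getD 1 "") "\"" ++ "\""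
            | none => "")
          source ++ ("rinstall \"${srcdir}/${pkgname}-${pkgver}/" ++ pvEscape (src.getD "") "\"" ++
            "\" \"${pkgdir}/" ++ pvEscape target "\"" ++ "\" " ++ append ++ "\n")) s
    = s ++ PySem.Str.join "" ((pvCopyAll mode ms).map (· ++ "\n")) := by
  rw [PySem.List.foldl_congr_mem ms _
    (fun source movement_def => source ++
      PySem.Str.join "" ((pvCopy mode (pvSt (PySem.Dict.ofList movement_def).items)).map (· ++ "\n")))
    s (fun acc x _ => A2_body mode x acc)]
  rw [foldl_append_join (fun movement_def =>
    PySem.Str.join "" ((pvCopy mode (pvSt (PySem.Dict.ofList movement_def).items)).map (· ++ "\n")))]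
  rw [pvCopyAll, join_map_flatMap]

theorem B_body (mode : String) (m : List (String × String)) (acc : List String × List String) :
    (let st := (PySem.Dict.ofList m).items.foldl
        (fun (st : List String × Option String × Option String × Option String × Option String) kv =>
          let (dirs, src, target, chmod, chown) := st
          if kv.1 == "chmod" then (dirs, src, target, some kv.2, chown)
          else if kv.1 == "chown" then (dirs, src, target, chmod, some kv.2)
          else (dirs ++ ["mkdir -p \"" ++
              ((if mode == "pkgbuild" then "$pkgdir/" else "") ++ pvEscape kv.2 "\"") ++ "\""],
            some kv.1, some kv.2, chmod, chown))
        (acc.1, none, none, none, none)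
     let (dirs, src, target, chmod, chown) := st
     match target with
     | none => (dirs, acc.2)
     | some target =>
       if mode == "pkgbuild" then
         let append := match chmod with
           | some c => "--mode=" ++ PySem.Int.toStr ((PySem.Int.ofStr? c).getD 0) ++ " "
           | none => ""
         let append := append ++ (match chown with
           | some c =>
             let parts := (PySem.Str.split? c ":").getD []
             "--owner=\"" ++ pvEscape (parts.getD 0 "") "\"" ++ "\" --group=\"" ++
               pvEscape (parts.getD 1 "") "\"" ++ "\""
           | none => "")
         (dirs, acc.2 ++ ["rinstall \"${srcdir}/${pkgname}-${pkgver}/" ++ pvEscape (src.getD "") "\"" ++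
           "\" \"${pkgdir}/" ++ pvEscape target "\"" ++ "\" " ++ append])
       else
         let cs := match chmod with
           | some c => ["chmod -R " ++ PySem.Int.toStr ((PySem.Int.ofStr? c).getD 0) ++
               " \"" ++ pvEscape (src.getD "") "\"" ++ "\""]
           | none => []
         let cs := cs ++ (match chown with
           | some c => ["chown -R \"" ++ pvEscape c "\"" ++ "\" \"" ++ pvEscape (src.getD "") "\"" ++ "\""]
           | none => [])
         (dirs, acc.2 ++ cs ++
           ["rsync -pr \"" ++ pvEscape (src.getD "") "\"" ++ "\" \"" ++ pvEscape target "\"" ++ "\""]))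
    = (acc.1 ++ pvDirs mode (PySem.Dict.ofList m).items,
       acc.2 ++ pvCopy mode (pvSt (PySem.Dict.ofList m).items)) := by
  rw [B_inner mode (PySem.Dict.ofList m).items acc.1 none none none none]
  exact B_block mode
    (acc.1 ++ pvDirs mode (PySem.Dict.ofList m).items, pvSt (PySem.Dict.ofList m).items) acc.2

theorem B_outer (mode : String) (ms : List (List (String × String)))
    (dirs copies : List String) :
    ms.foldl (fun (acc : List String × List String) movement_def =>
      let st := (PySem.Dict.ofList movement_def).items.foldl
        (fun (st : List String × Option String × Option String × Option String × Option String) kv =>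
          let (dirs, src, target, chmod, chown) := st
          if kv.1 == "chmod" then (dirs, src, target, some kv.2, chown)
          else if kv.1 == "chown" then (dirs, src, target, chmod, some kv.2)
          else (dirs ++ ["mkdir -p \"" ++
              ((if mode == "pkgbuild" then "$pkgdir/" else "") ++ pvEscape kv.2 "\"") ++ "\""],
            some kv.1, some kv.2, chmod, chown))
        (acc.1, none, none, none, none)
      let (dirs, src, target, chmod, chown) := st
      match target with
      | none => (dirs, acc.2)
      | some target =>
        if mode == "pkgbuild" then
          let append := match chmod with
            | some c => "--mode=" ++ PySem.Int.toStr ((PySem.Int.ofStr? c).getD 0) ++ " "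
            | none => ""
          let append := append ++ (match chown with
            | some c =>
              let parts := (PySem.Str.split? c ":").getD []
              "--owner=\"" ++ pvEscape (parts.getD 0 "") "\"" ++ "\" --group=\"" ++
                pvEscape (parts.getD 1 "") "\"" ++ "\""
            | none => "")
          (dirs, acc.2 ++ ["rinstall \"${srcdir}/${pkgname}-${pkgver}/" ++ pvEscape (src.getD "") "\"" ++
            "\" \"${pkgdir}/" ++ pvEscape target "\"" ++ "\" " ++ append])
        else
          let cs := match chmod with
            | some c => ["chmod -R " ++ PySem.Int.toStr ((PySem.Int.ofStr? c).getD 0) ++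
                " \"" ++ pvEscape (src.getD "") "\"" ++ "\""]
            | none => []
          let cs := cs ++ (match chown with
            | some c => ["chown -R \"" ++ pvEscape c "\"" ++ "\" \"" ++ pvEscape (src.getD "") "\"" ++ "\""]
            | none => [])
          (dirs, acc.2 ++ cs ++
            ["rsync -pr \"" ++ pvEscape (src.getD "") "\"" ++ "\" \"" ++ pvEscape target "\"" ++ "\""]))
      (dirs, copies)
    = (dirs ++ pvDirsAll mode ms, copies ++ pvCopyAll mode ms) := by
  rw [PySem.List.foldl_congr_mem ms _
    (fun (acc : List String × List String) movement_def =>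
      (acc.1 ++ pvDirs mode (PySem.Dict.ofList movement_def).items,
       acc.2 ++ pvCopy mode (pvSt (PySem.Dict.ofList movement_def).items)))
    (dirs, copies) (fun acc x _ => B_body mode x acc)]
  rw [foldl_pair_append]
  rfl

-- ===== VERDICT (by name: the statement is the Claim_ definition above) =====
theorem generate_movements_spec : Claim_equal_generate_movements := by
  intro mode config indent _ _
  unfold Spec_generate_movements
  dsimp only [generate_movements, generate_movements_alt]
  rw [A1_outer, A2_outer, B_outer, indentLines_eq]
  congr 1
  by_cases hm : (mode == "pkgbuild") = true <;>
    simp [hm]
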